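-- pv_equiv track=rewrite | github.com/YoungChanShin/codingtest | programmers/Dynamic Programming/01.py | solution
-- ===== SOURCE A (Python) =====
-- def solution(N, number):
--
--     dp = [{}]
--     for i in range(1, 9):
--         nth = int(str(N) * i)
--         if nth == number:
--             return i
--         dp.append({nth})
--     for i in range(2, 9):  # 숫자를 몇개 쓰나
--         for j in range(1, i):  # 앞에 참조하는 숫자 갯수
--             for k in dp[j]:  # 계산 결과 중 택 1
--                 for l in dp[i - j]:
--                     result = {k + l, k - l, k * l}
--                     if l != 0:
--                         result.add(k // l)
--                     if number in result:
--                         return i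
--                     dp[i] = dp[i].union(result)
--     return -1
-- ===== SOURCE B (Python) =====
-- def solution(N, number):
--     # Build the repeated-digit seeds incrementally; return early if one hits.
--     reps = []
--     for i in range(1, 9):
--         reps.append(int(str(N) * i))
--         if reps[-1] == number:
--             return i
--     # values(i) = every value expressible with exactly i copies of N,
--     # computed by memoized recursion over the split point j.
--     memo = {}
--
--     def values(i):
--         if i not in memo:
--             vals = {reps[i - 1]}
--             for j in range(1, i):
--                 for a in values(j):
--                     for b in values(i - j):
--                         vals.update((a + b, a - b, a * b))
--                         if b != 0:
--                             vals.add(a // b)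
--             memo[i] = vals
--         return memo[i]
--
--     for i in range(2, 9):
--         if number in values(i):
--             return i
--     return -1
-- ===== Notes on version B (the rewrite author's own statement) =====
-- stated objective: alternative
-- what changed: Replaces the iterative dp-table with interleaved early returns and per-combination 'dp[i] = dp[i].union(result)' rebuilding by a memoized recursive values(i) over the split point (seeds built incrementally, bulk in-place set.update, one membership test per level), keeping exact ordered-split and floor-division semantics.
import Mathlib
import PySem

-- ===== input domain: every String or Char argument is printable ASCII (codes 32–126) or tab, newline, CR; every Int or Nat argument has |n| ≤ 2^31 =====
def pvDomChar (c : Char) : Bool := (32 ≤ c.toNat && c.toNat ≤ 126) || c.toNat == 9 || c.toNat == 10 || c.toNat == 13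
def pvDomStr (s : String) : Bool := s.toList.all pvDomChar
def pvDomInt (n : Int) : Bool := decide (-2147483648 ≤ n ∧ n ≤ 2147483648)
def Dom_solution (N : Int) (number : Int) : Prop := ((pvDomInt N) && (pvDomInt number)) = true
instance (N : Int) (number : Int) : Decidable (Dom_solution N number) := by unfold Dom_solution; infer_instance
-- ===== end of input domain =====

-- B replaces A's iterative dp table (whose per-combination `dp[i] = dp[i].union(result)`
-- copies the accumulated set on every combination) by a memoized recursive values(i) with
-- in-place bulk updates and one membership test per level; same return value everywhere
-- both Pythons return (A and B raise ValueError on the same inputs: N < 0 with N != number).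

-- ===== PORT A =====
-- int(str(N) * i)  (none = ValueError; both Pythons contain this exact expression)
def pvNth (N : Int) (i : Nat) : Option Int :=
  PySem.Int.ofStr? ((List.replicate i (PySem.Int.toStr N)).foldl (· ++ ·) "")

-- result = {k + l, k - l, k * l}; if l != 0: result.add(k // l)
def pvResult (k l : Int) : PySem.Set Int :=
  let r := PySem.Set.ofList [k + l, k - l, k * l]
  if l ≠ 0 then PySem.Set.add r (PySem.Int.floordiv k l) else r

-- innermost loop: for l in dp[i - j] (T), early return when number in result,
-- else dp[i] = dp[i].union(result)
def pvALoopL (number : Int) (i : Nat) (k : Int) (ls : List Int)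
    (dp : List (PySem.Set Int)) : Option (List (PySem.Set Int)) :=
  match ls with
  | [] => some dp
  | l :: rest =>
    let r := pvResult k l
    if PySem.Set.contains r number then none
    else pvALoopL number i k rest
      (PySem.List.pySetD dp (i : Int)
        (PySem.Set.union (PySem.List.pyGetD dp (i : Int) PySem.Set.empty) r))

-- for k in dp[j]
def pvALoopK (number : Int) (i : Nat) (ks : List Int) (t : List Int)
    (dp : List (PySem.Set Int)) : Option (List (PySem.Set Int)) :=
  match ks with
  | [] => some dp
  | k :: rest =>
    match pvALoopL number i k t dp with
    | none => none
    | some dp' => pvALoopK number i rest t dp'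

-- for j in range(1, i)
def pvALoopJ (number : Int) (i : Nat) (js : List Nat)
    (dp : List (PySem.Set Int)) : Option (List (PySem.Set Int)) :=
  match js with
  | [] => some dp
  | j :: rest =>
    match pvALoopK number i (PySem.List.pyGetD dp (j : Int) PySem.Set.empty)
        (PySem.List.pyGetD dp ((i : Int) - (j : Int)) PySem.Set.empty) dp with
    | none => none
    | some dp' => pvALoopJ number i rest dp'

-- for i in range(2, 9): early return i, else keep going; fall through to -1
def pvALoopI (number : Int) (is : List Nat) (dp : List (PySem.Set Int)) : Int :=
  match is with
  | [] => -1
  | i :: rest =>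
    match pvALoopJ number i (List.range' 1 (i - 1)) dp with
    | none => (i : Int)
    | some dp' => pvALoopI number rest dp'

-- first loop: nth = int(str(N)*i); if nth == number: return i; dp.append({nth})
-- (.inl 0 is the ValueError path of int(); excluded by Pre_solution)
def pvARep (N number : Int) (is : List Nat) (dp : List (PySem.Set Int)) :
    Sum Int (List (PySem.Set Int)) :=
  match is with
  | [] => .inr dp
  | i :: rest =>
    match pvNth N i with
    | none => .inl 0
    | some nth =>
      if nth = number then .inl (i : Int)
      else pvARep N number rest (dp ++ [PySem.Set.ofList [nth]])

def solution (N : Int) (number : Int) : Int :=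
  match pvARep N number (List.range' 1 8) [PySem.Set.empty] with
  | .inl r => r
  | .inr dp => pvALoopI number (List.range' 2 7) dp

-- ===== PORT B =====
-- reps.append(int(str(N) * i)); if reps[-1] == number: return i
def pvBRep (N number : Int) (is : List Nat) (reps : List Int) : Sum Int (List Int) :=
  match is with
  | [] => .inr reps
  | i :: rest =>
    match pvNth N i with
    | none => .inl 0
    | some v =>
      let reps' := reps ++ [v]
      if PySem.List.pyGetD reps' (-1) 0 = number then .inl (i : Int)
      else pvBRep N number rest reps'

-- values(i): memoized recursion in Python; the memo is pure caching, so it is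
-- ported as plain well-founded recursion on i (each values(j) looked up once per split).
def pvValues (reps : List Int) (i : Nat) : PySem.Set Int :=
  (List.range' 1 (i - 1)).attach.foldl
    (fun vals jh =>
      let vj := pvValues reps jh.1
      let vij := pvValues reps (i - jh.1)
      vj.foldl (fun vals a =>
        vij.foldl (fun vals b =>
          let vals2 := PySem.Set.update vals [a + b, a - b, a * b]
          if b ≠ 0 then PySem.Set.add vals2 (PySem.Int.floordiv a b) else vals2) vals) vals)
    (PySem.Set.ofList [PySem.List.pyGetD reps ((i : Int) - 1) 0])
termination_by i
decreasing_by
  · have h := List.mem_range'_1.mp jh.2; omega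
  · have h := List.mem_range'_1.mp jh.2; omega

-- for i in range(2, 9): if number in values(i): return i
def pvBFind (number : Int) (reps : List Int) (is : List Nat) : Int :=
  match is with
  | [] => -1
  | i :: rest =>
    if PySem.Set.contains (pvValues reps i) number then (i : Int)
    else pvBFind number reps rest

def solution_alt (N : Int) (number : Int) : Int :=
  match pvBRep N number (List.range' 1 8) [] with
  | .inl r => r
  | .inr reps => pvBFind number reps (List.range' 2 7)

-- ===== PRECONDITION & SPEC =====
-- Pre_ excludes exactly the inputs where Python A raises ValueError (int('-3-3') at i = 2:
-- N negative and not returned at i = 1); Python B raises the same ValueError there.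
def Pre_solution (N : Int) (number : Int) : Prop := 0 ≤ N ∨ N = number
instance (N : Int) (number : Int) : Decidable (Pre_solution N number) := by
  unfold Pre_solution; infer_instance

def pvWitness_solution : Int × Int := (5, 26)

def Spec_solution (N : Int) (number : Int) (out : Int) : Prop := out = solution_alt N number
instance (N : Int) (number : Int) (out : Int) : Decidable (Spec_solution N number out) := by
  unfold Spec_solution; infer_instance

-- ===== CLAIM (what is proved, stated in full; the proofs are below) =====
def Claim_equal_solution : Prop := ∀ (N : Int) (number : Int), Dom_solution N number → Pre_solution N number → Spec_solution N number (solution N number)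

-- ===== LEMMAS AND PROOFS =====

-- membership characterisation of one {k+l, k-l, k*l (, k//l)} combination set
def pvMemRes (x k l : Int) : Prop :=
  x = k + l ∨ x = k - l ∨ x = k * l ∨ (l ≠ 0 ∧ x = PySem.Int.floordiv k l)

lemma pv_mem_result (x k l : Int) : x ∈ pvResult k l ↔ pvMemRes x k l := by
  unfold pvResult pvMemRes
  by_cases h : l = 0
  · simp [h, PySem.Set.mem_ofList]
  · simp [h, PySem.Set.mem_add, PySem.Set.mem_ofList]
    tauto

lemma pv_mem_foldl {β : Type} (f : PySem.Set Int → β → PySem.Set Int) (q : β → Int → Prop)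
    (hf : ∀ s b x, x ∈ f s b ↔ x ∈ s ∨ q b x) :
    ∀ (l : List β) (init : PySem.Set Int) (x : Int),
      x ∈ l.foldl f init ↔ x ∈ init ∨ ∃ b ∈ l, q b x := by
  intro l
  induction l with
  | nil => simp
  | cons b rest ih =>
    intro init x
    rw [List.foldl_cons, ih, hf]
    constructor
    · rintro ((h | h) | ⟨b', hb', h⟩)
      · exact Or.inl h
      · exact Or.inr ⟨b, List.mem_cons_self .., h⟩
      · exact Or.inr ⟨b', List.mem_cons_of_mem _ hb', h⟩
    · rintro (h | ⟨b', hb', h⟩)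
      · exact Or.inl (Or.inl h)
      · rcases List.mem_cons.mp hb' with h' | h'
        · exact Or.inl (Or.inr (h' ▸ h))
        · exact Or.inr ⟨b', h', h⟩

lemma pv_mem_values (reps : List Int) (i : Nat) (x : Int) :
    x ∈ pvValues reps i ↔
      x = PySem.List.pyGetD reps ((i : Int) - 1) 0 ∨
      ∃ j ∈ List.range' 1 (i - 1), ∃ a ∈ pvValues reps j,
        ∃ b ∈ pvValues reps (i - j), pvMemRes x a b := by
  rw [pvValues]
  rw [pv_mem_foldl _
      (fun (jh : {j // j ∈ List.range' 1 (i - 1)}) x =>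
        ∃ a ∈ pvValues reps jh.1, ∃ b ∈ pvValues reps (i - jh.1), pvMemRes x a b)
      (by
        intro s jh x
        rw [pv_mem_foldl _
            (fun a x => ∃ b ∈ pvValues reps (i - jh.1), pvMemRes x a b)
            (by
              intro s' a x
              rw [pv_mem_foldl _ (fun b x => pvMemRes x a b)
                  (by
                    intro s'' b x
                    by_cases hb : b = 0
                    · simp [hb, pvMemRes]
                      tauto
                    · simp [hb, PySem.Set.mem_add, pvMemRes]
                      tauto)]
              try tauto)]
        try tauto)]
  simp only [PySem.Set.mem_ofList, List.mem_singleton]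
  constructor
  · rintro (h | ⟨⟨j, hj⟩, -, h⟩)
    · exact Or.inl h
    · exact Or.inr ⟨j, hj, h⟩
  · rintro (h | ⟨j, hj, h⟩)
    · exact Or.inl h
    · exact Or.inr ⟨⟨j, hj⟩, List.mem_attach _ _, h⟩

-- List.getD facts for the dp table
lemma pv_getD_set_self (dp : List (PySem.Set Int)) (i : Nat) (h : i < dp.length)
    (v : PySem.Set Int) : (dp.set i v).getD i [] = v := by
  simp [List.getD, List.getElem?_set_self h]

lemma pv_getD_set_ne (dp : List (PySem.Set Int)) (i m : Nat) (h : m ≠ i)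
    (v : PySem.Set Int) : (dp.set i v).getD m [] = dp.getD m [] := by
  simp [List.getD, List.getElem?_set_ne (by omega : i ≠ m)]

-- innermost loop (over dp[i-j])
lemma pvALoopL_spec (number : Int) (i : Nat) (k : Int) :
    ∀ (ls : List Int) (dp : List (PySem.Set Int)), i < dp.length →
      (pvALoopL number i k ls dp = none ↔ ∃ l ∈ ls, pvMemRes number k l) ∧
      (∀ dp', pvALoopL number i k ls dp = some dp' →
        dp'.length = dp.length ∧ (∀ m, m ≠ i → dp'.getD m [] = dp.getD m []) ∧
        (∀ x, x ∈ dp'.getD i [] ↔ x ∈ dp.getD i [] ∨ ∃ l ∈ ls, pvMemRes x k l)) := by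
  intro ls
  induction ls with
  | nil =>
    intro dp _
    constructor
    · simp [pvALoopL]
    · intro dp' h
      simp only [pvALoopL, Option.some.injEq] at h
      subst h
      simp
  | cons l rest ih =>
    intro dp hi
    by_cases hhit : number ∈ pvResult k l
    · have hm : pvMemRes number k l := (pv_mem_result _ _ _).mp hhit
      have hstep : pvALoopL number i k (l :: rest) dp = none := by
        simp [pvALoopL, hhit]
      constructor
      · rw [hstep]
        simp only [true_iff]
        exact ⟨l, List.mem_cons_self .., hm⟩
      · intro dp' h
        rw [hstep] at h
        simp at h
    · have hnm : ¬ pvMemRes number k l := fun h => hhit ((pv_mem_result _ _ _).mpr h)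
      have hstep : pvALoopL number i k (l :: rest) dp =
          pvALoopL number i k rest
            (dp.set i (PySem.Set.union (dp.getD i []) (pvResult k l))) := by
        simp [pvALoopL, hhit, List.getD]
      set dp2 := dp.set i (PySem.Set.union (dp.getD i []) (pvResult k l)) with hdp2
      have hlen2 : dp2.length = dp.length := by simp [hdp2]
      have hi2 : i < dp2.length := by omega
      obtain ⟨ihnone, ihsome⟩ := ih dp2 hi2
      constructor
      · rw [hstep, ihnone]
        simp only [List.mem_cons]
        constructor
        · rintro ⟨l', hl', h⟩; exact ⟨l', Or.inr hl', h⟩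
        · rintro ⟨l', hl' | hl', h⟩
          · exact absurd (hl' ▸ h) hnm
          · exact ⟨l', hl', h⟩
      · intro dp' h
        rw [hstep] at h
        obtain ⟨h1, h2, h3⟩ := ihsome dp' h
        refine ⟨by omega, ?_, ?_⟩
        · intro m hm
          rw [h2 m hm, hdp2, pv_getD_set_ne _ _ _ hm]
        · intro x
          rw [h3 x, hdp2, pv_getD_set_self _ _ hi, PySem.Set.mem_union, pv_mem_result]
          simp only [List.mem_cons]
          constructor
          · rintro ((h | h) | ⟨l', hl', h⟩)
            · exact Or.inl h
            · exact Or.inr ⟨l, Or.inl rfl, h⟩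
            · exact Or.inr ⟨l', Or.inr hl', h⟩
          · rintro (h | ⟨l', hl' | hl', h⟩)
            · exact Or.inl (Or.inl h)
            · exact Or.inl (Or.inr (hl' ▸ h))
            · exact Or.inr ⟨l', hl', h⟩

-- middle loop (over dp[j])
lemma pvALoopK_spec (number : Int) (i : Nat) (t : List Int) :
    ∀ (ks : List Int) (dp : List (PySem.Set Int)), i < dp.length →
      (pvALoopK number i ks t dp = none ↔
        ∃ k ∈ ks, ∃ l ∈ t, pvMemRes number k l) ∧
      (∀ dp', pvALoopK number i ks t dp = some dp' →
        dp'.length = dp.length ∧ (∀ m, m ≠ i → dp'.getD m [] = dp.getD m []) ∧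
        (∀ x, x ∈ dp'.getD i [] ↔ x ∈ dp.getD i [] ∨ ∃ k ∈ ks, ∃ l ∈ t, pvMemRes x k l)) := by
  intro ks
  induction ks with
  | nil =>
    intro dp _
    constructor
    · simp [pvALoopK]
    · intro dp' h
      simp only [pvALoopK, Option.some.injEq] at h
      subst h
      simp
  | cons k rest ih =>
    intro dp hi
    obtain ⟨lnone, lsome⟩ := pvALoopL_spec number i k t dp hi
    cases hL : pvALoopL number i k t dp with
    | none =>
      have hex := lnone.mp hL
      constructor
      · simp only [pvALoopK, hL, true_iff]
        exact ⟨k, List.mem_cons_self .., hex⟩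
      · intro dp' h
        simp [pvALoopK, hL] at h
    | some dp2 =>
      have hnex : ¬ ∃ l ∈ t, pvMemRes number k l := fun h => by
        have := lnone.mpr h; rw [hL] at this; simp at this
      obtain ⟨h1, h2, h3⟩ := lsome dp2 hL
      have hi2 : i < dp2.length := by omega
      obtain ⟨ihnone, ihsome⟩ := ih dp2 hi2
      have hstep : pvALoopK number i (k :: rest) t dp = pvALoopK number i rest t dp2 := by
        simp [pvALoopK, hL]
      constructor
      · rw [hstep, ihnone]
        simp only [List.mem_cons]
        constructor
        · rintro ⟨k', hk', h⟩; exact ⟨k', Or.inr hk', h⟩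
        · rintro ⟨k', hk' | hk', h⟩
          · exact absurd (hk' ▸ h) hnex
          · exact ⟨k', hk', h⟩
      · intro dp' h
        rw [hstep] at h
        obtain ⟨g1, g2, g3⟩ := ihsome dp' h
        refine ⟨by omega, ?_, ?_⟩
        · intro m hm; rw [g2 m hm, h2 m hm]
        · intro x
          rw [g3 x, h3 x]
          simp only [List.mem_cons]
          constructor
          · rintro ((h | h) | ⟨k', hk', h⟩)
            · exact Or.inl h
            · exact Or.inr ⟨k, Or.inl rfl, h⟩
            · exact Or.inr ⟨k', Or.inr hk', h⟩
          · rintro (h | ⟨k', hk' | hk', h⟩)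
            · exact Or.inl (Or.inl h)
            · exact Or.inl (Or.inr (hk' ▸ h))
            · exact Or.inr ⟨k', hk', h⟩

-- outer split loop (over j in range(1, i))
lemma pvALoopJ_spec (number : Int) (i : Nat) :
    ∀ (js : List Nat) (dp : List (PySem.Set Int)), i < dp.length →
      (∀ j ∈ js, 1 ≤ j ∧ j < i) →
      (pvALoopJ number i js dp = none ↔
        ∃ j ∈ js, ∃ k ∈ dp.getD j [], ∃ l ∈ dp.getD (i - j) [], pvMemRes number k l) ∧
      (∀ dp', pvALoopJ number i js dp = some dp' →
        dp'.length = dp.length ∧ (∀ m, m ≠ i → dp'.getD m [] = dp.getD m []) ∧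
        (∀ x, x ∈ dp'.getD i [] ↔ x ∈ dp.getD i [] ∨
          ∃ j ∈ js, ∃ k ∈ dp.getD j [], ∃ l ∈ dp.getD (i - j) [], pvMemRes x k l)) := by
  intro js
  induction js with
  | nil =>
    intro dp _ _
    constructor
    · simp [pvALoopJ]
    · intro dp' h
      simp only [pvALoopJ, Option.some.injEq] at h
      subst h
      simp
  | cons j rest ih =>
    intro dp hi hjs
    obtain ⟨hj1, hji⟩ := hjs j (List.mem_cons_self ..)
    have hcast : (i : Int) - (j : Int) = ((i - j : Nat) : Int) := by omega
    have hargs : pvALoopJ number i (j :: rest) dp =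
        (match pvALoopK number i (dp.getD j []) (dp.getD (i - j) []) dp with
         | none => none
         | some dp' => pvALoopJ number i rest dp') := by
      simp [pvALoopJ, hcast, PySem.List.pyGetD_natCast, PySem.Set.empty]
    obtain ⟨knone, ksome⟩ := pvALoopK_spec number i (dp.getD (i - j) []) (dp.getD j []) dp hi
    cases hK : pvALoopK number i (dp.getD j []) (dp.getD (i - j) []) dp with
    | none =>
      have hex := knone.mp hK
      constructor
      · rw [hargs, hK]
        simp only [List.mem_cons, true_iff]
        exact ⟨j, Or.inl rfl, hex⟩
      · intro dp' h
        rw [hargs, hK] at h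
        simp at h
    | some dp2 =>
      have hnex : ¬ ∃ k ∈ dp.getD j [], ∃ l ∈ dp.getD (i - j) [], pvMemRes number k l :=
        fun h => by have := knone.mpr h; rw [hK] at this; simp at this
      obtain ⟨h1, h2, h3⟩ := ksome dp2 hK
      have hi2 : i < dp2.length := by omega
      have hrest : ∀ j' ∈ rest, 1 ≤ j' ∧ j' < i := fun j' hj' => hjs j' (List.mem_cons_of_mem _ hj')
      obtain ⟨ihnone, ihsome⟩ := ih dp2 hi2 hrest
      -- dp2 agrees with dp off index i; all indices j', i - j' used below differ from i
      have hoff : ∀ j' ∈ rest, dp2.getD j' [] = dp.getD j' [] ∧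
          dp2.getD (i - j') [] = dp.getD (i - j') [] := by
        intro j' hj'
        obtain ⟨ha, hb⟩ := hrest j' hj'
        exact ⟨h2 j' (by omega), h2 (i - j') (by omega)⟩
      have hstep : pvALoopJ number i (j :: rest) dp = pvALoopJ number i rest dp2 := by
        rw [hargs, hK]
      have hexiff : (∃ j' ∈ rest, ∃ k ∈ dp2.getD j' [], ∃ l ∈ dp2.getD (i - j') [], pvMemRes number k l) ↔
          (∃ j' ∈ rest, ∃ k ∈ dp.getD j' [], ∃ l ∈ dp.getD (i - j') [], pvMemRes number k l) := by
        constructor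
        · rintro ⟨j', hj', hx⟩
          obtain ⟨ha, hb⟩ := hoff j' hj'
          rw [ha, hb] at hx
          exact ⟨j', hj', hx⟩
        · rintro ⟨j', hj', hx⟩
          obtain ⟨ha, hb⟩ := hoff j' hj'
          rw [← ha, ← hb] at hx
          exact ⟨j', hj', hx⟩
      constructor
      · rw [hstep, ihnone, hexiff]
        simp only [List.mem_cons]
        constructor
        · rintro ⟨j', hj', hx⟩; exact ⟨j', Or.inr hj', hx⟩
        · rintro ⟨j', hj' | hj', hx⟩
          · exact absurd (hj' ▸ hx) hnex
          · exact ⟨j', hj', hx⟩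
      · intro dp' h
        rw [hstep] at h
        obtain ⟨g1, g2, g3⟩ := ihsome dp' h
        refine ⟨by omega, ?_, ?_⟩
        · intro m hm; rw [g2 m hm, h2 m hm]
        · intro x
          rw [g3 x, h3 x]
          simp only [List.mem_cons]
          constructor
          · rintro ((h | h) | hx)
            · exact Or.inl h
            · exact Or.inr ⟨j, Or.inl rfl, h⟩
            · obtain ⟨j', hj', hy⟩ := hx
              obtain ⟨ha, hb⟩ := hoff j' hj'
              rw [ha, hb] at hy
              exact Or.inr ⟨j', Or.inr hj', hy⟩
          · rintro (h | ⟨j', hj' | hj', hy⟩)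
            · exact Or.inl (Or.inl h)
            · exact Or.inl (Or.inr (hj' ▸ hy))
            · obtain ⟨ha, hb⟩ := hoff j' hj'
              rw [← ha, ← hb] at hy
              exact Or.inr ⟨j', hj', hy⟩

-- invariant tying A's dp table to B's values(·) after phase 1
def pvInv (reps : List Int) (i : Nat) (dp : List (PySem.Set Int)) : Prop :=
  dp.length = 9 ∧ reps.length = 8 ∧
  (∀ m, 1 ≤ m → m < i → ∀ x, (x ∈ dp.getD m [] ↔ x ∈ pvValues reps m)) ∧
  (∀ m, i ≤ m → m ≤ 8 → dp.getD m [] = [reps.getD (m - 1) 0])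

lemma pv_phase2 (number : Int) (reps : List Int)
    (hnum : ∀ v ∈ reps, v ≠ number) :
    ∀ (c i : Nat) (dp : List (PySem.Set Int)), 2 ≤ i → i + c = 9 → pvInv reps i dp →
      pvALoopI number (List.range' i c) dp = pvBFind number reps (List.range' i c) := by
  intro c
  induction c with
  | zero => intro i dp _ _ _; rfl
  | succ c ih =>
    intro i dp hi2 hic hinv
    obtain ⟨hlen, hrlen, hlt, hge⟩ := hinv
    have hi8 : i ≤ 8 := by omega
    have hidp : i < dp.length := by omega
    have hjs : ∀ j ∈ List.range' 1 (i - 1), 1 ≤ j ∧ j < i := by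
      intro j hj
      have := List.mem_range'_1.mp hj
      omega
    obtain ⟨jnone, jsome⟩ := pvALoopJ_spec number i (List.range' 1 (i - 1)) dp hidp hjs
    -- the big existential over A's dp equals the one over B's values
    have hexiff : (∃ j ∈ List.range' 1 (i - 1), ∃ k ∈ dp.getD j [],
        ∃ l ∈ dp.getD (i - j) [], pvMemRes number k l) ↔
        (∃ j ∈ List.range' 1 (i - 1), ∃ a ∈ pvValues reps j,
          ∃ b ∈ pvValues reps (i - j), pvMemRes number a b) := by
      constructor
      · rintro ⟨j, hj, k, hk, l, hl, hres⟩
        obtain ⟨hj1, hji⟩ := hjs j hj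
        exact ⟨j, hj, k, (hlt j hj1 hji k).mp hk, l,
          (hlt (i - j) (by omega) (by omega) l).mp hl, hres⟩
      · rintro ⟨j, hj, a, ha, b, hb, hres⟩
        obtain ⟨hj1, hji⟩ := hjs j hj
        exact ⟨j, hj, a, (hlt j hj1 hji a).mpr ha, b,
          (hlt (i - j) (by omega) (by omega) b).mpr hb, hres⟩
    have hseed : PySem.List.pyGetD reps ((i : Int) - 1) 0 = reps.getD (i - 1) 0 := by
      have : (i : Int) - 1 = ((i - 1 : Nat) : Int) := by omega
      rw [this, PySem.List.pyGetD_natCast]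
    have hseedmem : reps.getD (i - 1) 0 ∈ reps := by
      have h8 : i - 1 < reps.length := by omega
      rw [List.getD_eq_getElem _ _ h8]
      exact List.getElem_mem h8
    have hBmem : (number ∈ pvValues reps i) ↔
        (∃ j ∈ List.range' 1 (i - 1), ∃ a ∈ pvValues reps j,
          ∃ b ∈ pvValues reps (i - j), pvMemRes number a b) := by
      rw [pv_mem_values, hseed]
      constructor
      · rintro (h | h)
        · exact absurd h.symm (hnum _ hseedmem)
        · exact h
      · exact Or.inr
    have hrange : List.range' i (c + 1) = i :: List.range' (i + 1) c := rfl
    rw [hrange]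
    cases hJ : pvALoopJ number i (List.range' 1 (i - 1)) dp with
    | none =>
      have hBm : number ∈ pvValues reps i := hBmem.mpr (hexiff.mp (jnone.mp hJ))
      simp [pvALoopI, pvBFind, hJ, hBm]
    | some dp2 =>
      have hnA : ¬ (∃ j ∈ List.range' 1 (i - 1), ∃ k ∈ dp.getD j [],
          ∃ l ∈ dp.getD (i - j) [], pvMemRes number k l) := fun h => by
        have := jnone.mpr h; rw [hJ] at this; simp at this
      have hBn : number ∉ pvValues reps i := fun h => hnA (hexiff.mpr (hBmem.mp h))
      obtain ⟨g1, g2, g3⟩ := jsome dp2 hJ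
      have hinv2 : pvInv reps (i + 1) dp2 := by
        refine ⟨by omega, hrlen, ?_, ?_⟩
        · intro m hm1 hmi x
          rcases Nat.lt_or_ge m i with hmlt | hmge
          · rw [g2 m (by omega)]
            exact hlt m hm1 hmlt x
          · have hmi' : m = i := by omega
            subst hmi'
            rw [g3 x, hge m (le_refl _) hi8, pv_mem_values, hseed]
            simp only [List.mem_singleton]
            constructor
            · rintro (h | hx)
              · exact Or.inl h
              · obtain ⟨j, hj, k, hk, l, hl, hres⟩ := hx
                obtain ⟨hj1, hji⟩ := hjs j hj
                exact Or.inr ⟨j, hj, k, (hlt j hj1 hji k).mp hk, l,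
                  (hlt (m - j) (by omega) (by omega) l).mp hl, hres⟩
            · rintro (h | hx)
              · exact Or.inl h
              · obtain ⟨j, hj, a, ha, b, hb, hres⟩ := hx
                obtain ⟨hj1, hji⟩ := hjs j hj
                exact Or.inr ⟨j, hj, a, (hlt j hj1 hji a).mpr ha, b,
                  (hlt (m - j) (by omega) (by omega) b).mpr hb, hres⟩
        · intro m hm1 hm8
          rw [g2 m (by omega)]
          exact hge m (by omega) hm8
      have := ih (i + 1) dp2 (by omega) (by omega) hinv2
      simp [pvALoopI, pvBFind, hJ, hBn, this]

-- phase 1: A's repunit loop over dp-as-singletons agrees with B's reps loop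
lemma pv_phase1 (N number : Int) :
    ∀ (is : List Nat) (reps : List Int), (∀ v ∈ reps, v ≠ number) →
      (∃ r, pvARep N number is (PySem.Set.empty :: reps.map (fun v => [v])) = .inl r ∧
            pvBRep N number is reps = .inl r) ∨
      (∃ reps',
        pvARep N number is (PySem.Set.empty :: reps.map (fun v => [v])) =
          .inr (PySem.Set.empty :: reps'.map (fun v => [v])) ∧
        pvBRep N number is reps = .inr reps' ∧
        reps'.length = reps.length + is.length ∧ (∀ v ∈ reps', v ≠ number)) := by
  intro is
  induction is with
  | nil =>
    intro reps hnum
    exact Or.inr ⟨reps, rfl, rfl, by simp, hnum⟩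
  | cons i rest ih =>
    intro reps hnum
    cases hN : pvNth N i with
    | none =>
      left
      exact ⟨0, by simp [pvARep, hN], by simp [pvBRep, hN]⟩
    | some v =>
      have hlast : PySem.List.pyGetD (reps ++ [v]) (-1) 0 = v := by
        simp [PySem.List.pyGetD, PySem.List.pyGet?_neg_one_append_singleton]
      by_cases hv : v = number
      · left
        refine ⟨(i : Int), ?_, ?_⟩
        · simp [pvARep, hN, hv]
        · simp [pvBRep, hN, hv]
      · have hA : pvARep N number (i :: rest) (PySem.Set.empty :: reps.map (fun v => [v])) =
            pvARep N number rest (PySem.Set.empty :: (reps ++ [v]).map (fun v => [v])) := by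
          simp [pvARep, hN, hv, PySem.Set.ofList, PySem.Set.add, PySem.Set.empty]
        have hB : pvBRep N number (i :: rest) reps = pvBRep N number rest (reps ++ [v]) := by
          simp [pvBRep, hN, hlast, hv]
        have hnum' : ∀ w ∈ reps ++ [v], w ≠ number := by
          intro w hw
          rcases List.mem_append.mp hw with h | h
          · exact hnum w h
          · rw [List.mem_singleton.mp h]; exact hv
        rcases ih (reps ++ [v]) hnum' with ⟨r, h1, h2⟩ | ⟨reps', h1, h2, h3, h4⟩
        · exact Or.inl ⟨r, by rw [hA, h1], by rw [hB, h2]⟩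
        · refine Or.inr ⟨reps', by rw [hA, h1], by rw [hB, h2], ?_, h4⟩
          simp at h3 ⊢
          omega

-- the initial dp after phase 1 satisfies the invariant at level 2
lemma pv_init_inv (reps : List Int) (hrlen : reps.length = 8) :
    pvInv reps 2 (PySem.Set.empty :: reps.map (fun v => [v])) := by
  have hget : ∀ m, 1 ≤ m → m ≤ 8 →
      (PySem.Set.empty :: reps.map (fun v => ([v] : PySem.Set Int))).getD m [] =
        [reps.getD (m - 1) 0] := by
    intro m hm1 hm8
    obtain ⟨m', rfl⟩ : ∃ m', m = m' + 1 := ⟨m - 1, by omega⟩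
    have hm' : m' < reps.length := by omega
    rw [List.getD_cons_succ]
    simp only [Nat.add_sub_cancel]
    rw [List.getD_eq_getElem _ _ (by simpa using hm'), List.getD_eq_getElem _ _ hm']
    simp
  refine ⟨by simp [hrlen], hrlen, ?_, ?_⟩
  · intro m hm1 hm2 x
    have hm : m = 1 := by omega
    subst hm
    rw [hget 1 (le_refl _) (by omega), pv_mem_values]
    simp [PySem.List.pyGetD, PySem.List.pyGet?, PySem.List.pyIdx?, hrlen]
  · intro m hm1 hm8
    exact hget m (by omega) hm8


-- ===== VERDICT (by name: the statement is the Claim_ definition above) =====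
theorem solution_spec : Claim_equal_solution := by
  intro N number _ _
  unfold Spec_solution solution solution_alt
  rcases pv_phase1 N number (List.range' 1 8) [] (by simp) with
    ⟨r, hA, hB⟩ | ⟨reps, hA, hB, hlen, hnum⟩
  · have hA' : pvARep N number (List.range' 1 8) [PySem.Set.empty] = Sum.inl r := hA
    rw [hA', hB]
  · have hA' : pvARep N number (List.range' 1 8) [PySem.Set.empty] =
        Sum.inr (PySem.Set.empty :: reps.map (fun v => [v])) := hA
    rw [hA', hB]
    have hrlen : reps.length = 8 := by simpa using hlen
    exact pv_phase2 number reps hnum 7 2 _ (by omega) (by omega)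
      (pv_init_inv reps hrlen)
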